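-- pv_equiv track=rewrite | github.com/mgwood/Project-Euler | mwmath_home.py | rotate_digits
-- ===== SOURCE A (Python) =====
-- def rotate_digits(n):
--     str_n = str(n)
--     rotated_n = [str_n[1]]
--     for ii in str_n[2:(len(str_n))]:
--         rotated_n.append(ii)
--
--     rotated_n.append(str_n[0])
--
--     power = len(rotated_n)-1
--     rotated = 0
--     for jj in rotated_n:
--         rotated+=int(jj)*10**power
--
--         power-=1
--
--     return rotated
-- ===== SOURCE B (Python) =====
-- def rotate_digits(n):
--     p = 10
--     while p * 10 <= n:
--         p *= 10
--     return (n % p) * 10 + n // p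
-- ===== Notes on version B (the rewrite author's own statement) =====
-- stated objective: alternative
-- what changed: Replaces A's string conversion, character-copying loop and positional weighted-sum reconstruction by pure integer arithmetic: find p = 10^(digits-1) by repeated multiplication, then return (n % p) * 10 + n // p.
import Mathlib
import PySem

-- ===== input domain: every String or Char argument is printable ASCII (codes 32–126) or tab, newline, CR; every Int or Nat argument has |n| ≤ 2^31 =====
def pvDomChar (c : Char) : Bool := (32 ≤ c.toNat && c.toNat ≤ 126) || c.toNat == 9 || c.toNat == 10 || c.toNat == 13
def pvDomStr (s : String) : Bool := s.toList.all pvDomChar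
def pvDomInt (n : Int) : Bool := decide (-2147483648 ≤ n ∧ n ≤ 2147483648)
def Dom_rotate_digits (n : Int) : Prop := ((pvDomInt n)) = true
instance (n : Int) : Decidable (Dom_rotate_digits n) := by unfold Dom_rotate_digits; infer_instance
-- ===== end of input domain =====

-- B rotates the digits by pure integer arithmetic ((n % p) * 10 + n // p with p = 10^(digits-1))
-- instead of A's string conversion, character-copying loop and weighted-sum reconstruction; objective: alternative.

-- ===== PORT A =====
def rotate_digits (n : Int) : Int :=
  let str_n := PySem.Int.toChars n
  let rotated_n : List Char := [PySem.List.pyGetD str_n 1 ' ']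
  let rotated_n := (PySem.List.slice str_n (some 2) (some (PySem.List.len str_n))).foldl
    (fun acc ii => acc ++ [ii]) rotated_n
  let rotated_n := rotated_n ++ [PySem.List.pyGetD str_n 0 ' ']
  let st := rotated_n.foldl
    (fun (st : Int × Int) jj => (st.1 - 1, st.2 + (PySem.Int.ofChars? [jj]).getD 0 * 10 ^ st.1.toNat))
    (PySem.List.len rotated_n - 1, 0)
  st.2

-- ===== PORT B =====
-- while p * 10 <= n: p *= 10   (the '0 < p' conjunct is only a termination guard; at the
-- call site p = 10 > 0 and stays positive, so the guard never changes the computation)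
def pvGrowPow (n p : Int) : Int :=
  if p * 10 ≤ n ∧ 0 < p then pvGrowPow n (p * 10) else p
termination_by (n - p).toNat
decreasing_by omega

def rotate_digits_alt (n : Int) : Int :=
  let p := pvGrowPow n 10
  PySem.Int.mod n p * 10 + PySem.Int.floordiv n p

-- ===== PRECONDITION & SPEC =====
-- Pre_ admits exactly the inputs on which A returns normally: numbers with at least two
-- digits. On the excluded inputs A raises (IndexError on a single-digit string; ValueError
-- from int('-') on a negative number).
def Pre_rotate_digits (n : Int) : Prop := 10 ≤ n
instance (n : Int) : Decidable (Pre_rotate_digits n) := by unfold Pre_rotate_digits; infer_instance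
def pvWitness_rotate_digits : Int := 12

def Spec_rotate_digits (n : Int) (out : Int) : Prop := out = rotate_digits_alt n
instance (n : Int) (out : Int) : Decidable (Spec_rotate_digits n out) := by unfold Spec_rotate_digits; infer_instance

-- ===== CLAIM (what is proved, stated in full; the proofs are below) =====
def Claim_equal_rotate_digits : Prop := ∀ (n : Int), Dom_rotate_digits n → Pre_rotate_digits n → Spec_rotate_digits n (rotate_digits n)

-- ===== LEMMAS AND PROOFS =====

-- digit value of a one-character string, and the big-endian value of a character list
def pvDval (c : Char) : Int := (PySem.Int.ofChars? [c]).getD 0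
def pvBval (l : List Char) : Int := l.foldl (fun a c => a * 10 + pvDval c) 0

theorem pvDval_digitChar (d : Nat) (hd : d < 10) : pvDval (Nat.digitChar d) = (d : Int) := by
  interval_cases d <;> decide

theorem pvFold_aux (l : List Char) (a : Int) :
    l.foldl (fun a c => a * 10 + pvDval c) a
      = a * 10 ^ l.length + l.foldl (fun a c => a * 10 + pvDval c) 0 := by
  induction l generalizing a with
  | nil => simp
  | cons c t ih =>
    simp only [List.foldl_cons, List.length_cons]
    rw [ih (a * 10 + pvDval c), ih (0 * 10 + pvDval c)]
    ring

theorem pvBval_cons (c : Char) (t : List Char) :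
    pvBval (c :: t) = pvDval c * 10 ^ t.length + pvBval t := by
  simp only [pvBval, List.foldl_cons]
  rw [pvFold_aux]; ring

theorem pvBval_append_singleton (l : List Char) (c : Char) :
    pvBval (l ++ [c]) = pvBval l * 10 + pvDval c := by
  simp [pvBval, List.foldl_append]

theorem pvLoop (l : List Char) (acc : Int) :
    (l.foldl (fun (st : Int × Int) jj => (st.1 - 1, st.2 + (PySem.Int.ofChars? [jj]).getD 0 * 10 ^ st.1.toNat))
      ((l.length : Int) - 1, acc)).2 = acc + pvBval l := by
  show (l.foldl (fun (st : Int × Int) c => (st.1 - 1, st.2 + pvDval c * 10 ^ st.1.toNat))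
      ((l.length : Int) - 1, acc)).2 = acc + pvBval l
  induction l generalizing acc with
  | nil => simp [pvBval]
  | cons c t ih =>
    simp only [List.foldl_cons, List.length_cons]
    have h1 : ((t.length : Int) + 1 - 1 : Int) = (t.length : Int) := by ring
    have h2 : ((t.length : Int)).toNat = t.length := by omega
    rw [show ((t.length + 1 : Nat) : Int) = (t.length : Int) + 1 by push_cast; ring]
    simp only [h1, h2]
    rw [ih, pvBval_cons]
    ring

theorem pvBval_rev (l : List Nat) (h : ∀ d ∈ l, d < 10) :
    pvBval ((l.map Nat.digitChar).reverse) = (((Nat.ofDigits 10 l : Nat)) : Int) := by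
  induction l with
  | nil => simp [pvBval]
  | cons d t ih =>
    simp only [List.map_cons, List.reverse_cons]
    rw [pvBval_append_singleton, ih (fun x hx => h x (List.mem_cons_of_mem _ hx)),
      pvDval_digitChar d (h d List.mem_cons_self), Nat.ofDigits_cons]
    push_cast; ring

-- Nat.toDigits via Nat.digits
theorem pvToDigitsCore_eq (f : Nat) : ∀ (n : Nat) (ds : List Char), 0 < n → n < f →
    Nat.toDigitsCore 10 f n ds = ((Nat.digits 10 n).map Nat.digitChar).reverse ++ ds := by
  induction f with
  | zero => intro n ds h hf; omega
  | succ f ih =>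
    intro n ds hn hf
    rw [Nat.toDigitsCore]
    by_cases h0 : n / 10 = 0
    · simp only [h0, if_true]
      rw [Nat.digits_def' (by norm_num) hn, h0]
      simp
    · simp only [h0, if_false]
      rw [ih (n / 10) _ (Nat.pos_of_ne_zero h0) (by omega)]
      rw [Nat.digits_def' (by norm_num) hn]
      simp

theorem pvToChars_eq (m : Nat) (hm : 0 < m) :
    PySem.Int.toChars (m : Int) = ((Nat.digits 10 m).map Nat.digitChar).reverse := by
  have : ¬ ((m : Int) < 0) := by omega
  simp only [PySem.Int.toChars, this, if_false, Int.toNat_natCast]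
  rw [Nat.toDigits, pvToDigitsCore_eq (m + 1) m [] hm (by omega)]
  simp

theorem pvGrowPow_bracket (n : Int) : ∀ p : Int, 0 < p → p ≤ n →
    pvGrowPow n p ≤ n ∧ n < pvGrowPow n p * 10 ∧ ∃ k : Nat, pvGrowPow n p = p * 10 ^ k := by
  intro p
  induction p using pvGrowPow.induct n with
  | case1 p hg ih =>
    intro hp hpn
    rw [pvGrowPow, if_pos hg]
    obtain ⟨h1, h2, k, hk⟩ := ih (by omega) hg.1
    exact ⟨h1, h2, k + 1, by rw [hk]; ring⟩
  | case2 p hg =>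
    intro hp hpn
    rw [pvGrowPow, if_neg hg]
    exact ⟨hpn, by omega, 0, by ring⟩

theorem pvSliceDrop (a b : Char) (l : List Char) :
    PySem.List.slice (a :: b :: l) (some 2) (some (PySem.List.len (a :: b :: l))) = l := by
  rw [PySem.List.slice_toNat _ (by norm_num) (by simp [pysem]; positivity)]
  simp [pysem]
  omega

-- ===== VERDICT (by name: the statement is the Claim_ definition above) =====
theorem rotate_digits_spec : Claim_equal_rotate_digits := by
  intro n _ hpre
  unfold Pre_rotate_digits at hpre
  unfold Spec_rotate_digits
  -- decimal digits of n (little-endian)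
  set m := n.toNat with hmdef
  have hnm : (m : Int) = n := Int.toNat_of_nonneg (by omega)
  have hm10 : 10 ≤ m := by omega
  set ds := Nat.digits 10 m with hds
  have hne : ds ≠ [] := Nat.digits_ne_nil_iff_ne_zero.mpr (by omega)
  set dL := ds.getLast hne with hdL
  set ds' := ds.dropLast with hds'
  have hsplit : ds' ++ [dL] = ds := List.dropLast_append_getLast hne
  have hdlt : ∀ d ∈ ds, d < 10 := fun d hd => Nat.digits_lt_base (by norm_num) hd
  have hdL0 : dL ≠ 0 := Nat.getLast_digit_ne_zero 10 (by omega)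
  have hdL10 : dL < 10 := hdlt dL (List.getLast_mem hne)
  set L := ds.length with hL
  have hlen' : ds'.length = L - 1 := by simp [hds', List.length_dropLast, hL]
  have hofd : Nat.ofDigits 10 ds = m := Nat.ofDigits_digits 10 m
  have hub' : Nat.ofDigits 10 ds' < 10 ^ (L - 1) := by
    have := Nat.ofDigits_lt_base_pow_length (b := 10) (l := ds') (by norm_num)
      (fun x hx => hdlt x (by rw [← hsplit]; exact List.mem_append_left _ hx))
    rwa [hlen'] at this
  have hval : m = Nat.ofDigits 10 ds' + 10 ^ (L - 1) * dL := by
    rw [← hofd, ← hsplit, Nat.ofDigits_append, hlen', Nat.ofDigits_singleton]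
  have hlow : 10 ^ (L - 1) ≤ m := by
    have h1 : 10 ^ (L - 1) * 1 ≤ 10 ^ (L - 1) * dL :=
      Nat.mul_le_mul_left _ (by omega)
    omega
  have hhigh : m < 10 ^ L := Nat.lt_base_pow_length_digits (by norm_num)
  have hL2 : 2 ≤ L := by
    by_contra hc
    push Not at hc
    have : (10 : ℕ) ^ L ≤ 10 := by interval_cases L <;> norm_num
    omega
  -- str(n) as a character list
  set t := (ds'.map Nat.digitChar).reverse with ht
  have htlen : t.length = L - 1 := by simp [ht, hlen']
  have hcs2 : PySem.Int.toChars n = Nat.digitChar dL :: t := by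
    rw [← hnm, pvToChars_eq m (by omega), ← hds, ← hsplit]
    simp [ht]
  obtain ⟨c1, t2, ht2⟩ : ∃ c1 t2, t = c1 :: t2 := by
    cases htc : t with
    | nil => rw [htc] at htlen; simp at htlen; omega
    | cons a b => exact ⟨a, b, rfl⟩
  -- A's value: the big-endian value of the rotated character list
  have hA : rotate_digits n = pvBval (t ++ [Nat.digitChar dL]) := by
    simp only [rotate_digits, hcs2, ht2]
    rw [show PySem.List.pyGetD (Nat.digitChar dL :: c1 :: t2) 1 ' ' = c1 by simp [pysem]]
    rw [show PySem.List.pyGetD (Nat.digitChar dL :: c1 :: t2) 0 ' ' = Nat.digitChar dL by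
      simp [pysem]]
    rw [pvSliceDrop, PySem.List.foldl_append_singleton]
    simp only [PySem.List.len_eq]
    rw [pvLoop]
    simp
  have hBvalA : pvBval (t ++ [Nat.digitChar dL])
      = ((Nat.ofDigits 10 ds' : ℕ) : Int) * 10 + (dL : Int) := by
    rw [pvBval_append_singleton, ht,
      pvBval_rev ds' (fun x hx => hdlt x (by rw [← hsplit]; exact List.mem_append_left _ hx)),
      pvDval_digitChar dL hdL10]
  -- B's value
  obtain ⟨hPle, hPlt, k, hPk⟩ := pvGrowPow_bracket n 10 (by norm_num) (by omega)
  set P := pvGrowPow n 10 with hP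
  have hPpow : P = (10 : Int) ^ (k + 1) := by rw [hPk]; ring
  have hkL : k + 1 = L - 1 := by
    by_contra hne2
    rcases Nat.lt_or_ge (k + 1) (L - 1) with hlt | hge
    · have h1 : (10 : Int) ^ (k + 2) ≤ (10 : Int) ^ (L - 1) :=
        pow_le_pow_right₀ (by norm_num) (by omega)
      have h2 : ((10 ^ (L - 1) : ℕ) : Int) ≤ n := by rw [← hnm]; exact_mod_cast hlow
      push_cast at h2
      have : n < (10 : Int) ^ (k + 2) := by rw [hPpow] at hPlt; calc n < 10 ^ (k+1) * 10 := hPlt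
                                                                    _ = 10 ^ (k+2) := by ring
      omega
    · have hgt : L - 1 < k + 1 := by omega
      have h1 : (10 : Int) ^ L ≤ (10 : Int) ^ (k + 1) :=
        pow_le_pow_right₀ (by norm_num) (by omega)
      have h2 : n < ((10 ^ L : ℕ) : Int) := by rw [← hnm]; exact_mod_cast hhigh
      push_cast at h2
      rw [hPpow] at hPle
      omega
  have hPval : P = ((10 ^ (L - 1) : ℕ) : Int) := by rw [hPpow, hkL]; push_cast; ring
  have hPpos : (0 : Int) < P := by rw [hPpow]; positivity
  have hnsum : n = ((Nat.ofDigits 10 ds' : ℕ) : Int) + P * (dL : Int) := by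
    rw [hPval, ← hnm]
    exact_mod_cast hval
  have hofd_lt : ((Nat.ofDigits 10 ds' : ℕ) : Int) < P := by
    rw [hPval]; exact_mod_cast hub'
  have hofd_nonneg : (0 : Int) ≤ ((Nat.ofDigits 10 ds' : ℕ) : Int) := by positivity
  have hB : rotate_digits_alt n = ((Nat.ofDigits 10 ds' : ℕ) : Int) * 10 + (dL : Int) := by
    simp only [rotate_digits_alt]
    rw [← hP, PySem.Int.mod_eq_emod_of_pos hPpos, PySem.Int.floordiv_eq_ediv_of_pos hPpos]
    rw [hnsum, Int.add_mul_emod_self_left, Int.add_mul_ediv_left _ _ (by omega),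
      Int.emod_eq_of_lt hofd_nonneg hofd_lt,
      Int.ediv_eq_zero_of_lt hofd_nonneg hofd_lt]
    ring
  rw [hA, hBvalA, hB]
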